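-- pv_equiv track=rewrite | github.com/WispySkies/appliedalgo_npc_project | code_solution/misc_analysis_gen_code/complete_graph_generator.py | generate_complete_graph
-- ===== SOURCE A (Python) =====
-- def generate_complete_graph(num_vertices):
--     # Generate all possible combinations of vertices (edges)
--     alphabet = [chr(ord('a') + i) for i in range(26)]
--     extended_alphabet = alphabet + [f"{alphabet[i]}{alphabet[j]}" for i in range(26) for j in range(26)]
--     formatted_edges = set()
--
--     for v1 in extended_alphabet[:num_vertices]:
--         for v2 in extended_alphabet[:num_vertices]:
--             if v1 == v2 or f"{v1} {v2}" in formatted_edges or f"{v2} {v1}" in formatted_edges: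
--                 continue
--             formatted_edges.add(f"{v1} {v2}")
--
--     return formatted_edges
-- ===== SOURCE B (Python) =====
-- def generate_complete_graph(num_vertices):
--     # Same vertex labels as before: 26 single letters, then all 676 two-letter pairs.
--     alphabet = [chr(ord('a') + i) for i in range(26)]
--     vertices = (alphabet + [a + b for a in alphabet for b in alphabet])[:num_vertices]
--
--     # Each unordered edge is produced exactly once (first vertex paired with every
--     # later one), so no membership / reverse-order checks are needed at all.
--     edges = set()
--     while vertices:
--         v1 = vertices.pop(0)
--         for v2 in vertices:
--             edges.add(f"{v1} {v2}")
--     return edges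
-- ===== Notes on version B (the rewrite author's own statement) =====
-- stated objective: faster
-- what changed: B generates each unordered edge exactly once by pairing every vertex only with the vertices after it, dropping A's set-membership and reverse-order dedup checks over the full V x V square.
import Mathlib
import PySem

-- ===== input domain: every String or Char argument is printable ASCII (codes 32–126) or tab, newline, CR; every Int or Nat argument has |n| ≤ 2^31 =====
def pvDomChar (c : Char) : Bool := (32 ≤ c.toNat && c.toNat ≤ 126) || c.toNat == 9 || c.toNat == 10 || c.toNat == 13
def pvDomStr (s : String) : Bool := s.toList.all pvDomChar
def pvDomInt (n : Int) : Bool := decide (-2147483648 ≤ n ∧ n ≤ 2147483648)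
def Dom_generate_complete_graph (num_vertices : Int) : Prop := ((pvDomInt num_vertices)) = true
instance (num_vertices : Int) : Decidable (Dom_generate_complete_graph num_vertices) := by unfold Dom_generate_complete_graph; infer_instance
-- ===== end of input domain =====

-- B drops A's set-membership / reverse-order dedup over the full V×V square and emits each
-- unordered edge exactly once (each vertex paired only with the later ones); objective: faster.

-- ===== PORT A =====
-- chr(ord('a') + i)
def pvChr (i : Nat) : Char := Char.ofNat (97 + i)
-- alphabet = [chr(ord('a') + i) for i in range(26)]
def pvAlphabet : List String := (List.range 26).map (fun i => String.ofList [pvChr i])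
-- extended_alphabet = alphabet + [f"{alphabet[i]}{alphabet[j]}" for i in range(26) for j in range(26)]
-- (the two-letter f-string is built as its exact character list, per the PySem string convention)
def pvExtAlphabet : List String :=
  pvAlphabet ++ (List.range 26).flatMap (fun i => (List.range 26).map (fun j => String.ofList [pvChr i, pvChr j]))
-- f"{u} {v}"
def pvEdge (u v : String) : String := String.ofList (u.toList ++ ' ' :: v.toList)

def generate_complete_graph (num_vertices : Int) : List String :=
  let verts := PySem.List.slice pvExtAlphabet none (some num_vertices)   -- extended_alphabet[:num_vertices]
  verts.foldl (fun s v1 =>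
    verts.foldl (fun s v2 =>
      if v1 == v2 || PySem.Set.contains s (pvEdge v1 v2) || PySem.Set.contains s (pvEdge v2 v1)
      then s
      else PySem.Set.add s (pvEdge v1 v2)) s)
    PySem.Set.empty

-- ===== PORT B =====
-- the 'while vertices: v1 = vertices.pop(0); for v2 in vertices: edges.add(...)' loop of Source B
def pvAltLoop (edges : PySem.Set String) : List String → PySem.Set String
  | [] => edges
  | v1 :: rest => pvAltLoop (rest.foldl (fun s v2 => PySem.Set.add s (pvEdge v1 v2)) edges) rest

def generate_complete_graph_alt (num_vertices : Int) : List String :=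
  pvAltLoop PySem.Set.empty (PySem.List.slice pvExtAlphabet none (some num_vertices))

-- ===== PRECONDITION & SPEC =====
def Spec_generate_complete_graph (num_vertices : Int) (out : List String) : Prop := out = generate_complete_graph_alt num_vertices
instance (num_vertices : Int) (out : List String) : Decidable (Spec_generate_complete_graph num_vertices out) := by unfold Spec_generate_complete_graph; infer_instance

-- ===== CLAIM (what is proved, stated in full; the proofs are below) =====
def Claim_equal_generate_complete_graph : Prop := ∀ (num_vertices : Int), Dom_generate_complete_graph num_vertices → Spec_generate_complete_graph num_vertices (generate_complete_graph num_vertices)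

-- ===== LEMMAS AND PROOFS =====

-- a space-free string: edge strings decompose uniquely around their separating space
def pvSF (u : String) : Prop := ' ' ∉ u.toList

theorem pv_append_cons_inj {c : Char} : ∀ (l₁ l₂ r₁ r₂ : List Char), c ∉ l₁ → c ∉ l₂ →
    l₁ ++ c :: r₁ = l₂ ++ c :: r₂ → l₁ = l₂ ∧ r₁ = r₂ := by
  intro l₁
  induction l₁ with
  | nil =>
    intro l₂ r₁ r₂ _ h₂ h
    cases l₂ with
    | nil => simpa using h
    | cons b t =>
      simp only [List.nil_append, List.cons_append, List.cons.injEq] at h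
      exact absurd (h.1 ▸ List.mem_cons_self) h₂
  | cons a t ih =>
    intro l₂ r₁ r₂ h₁ h₂ h
    cases l₂ with
    | nil =>
      simp only [List.nil_append, List.cons_append, List.cons.injEq] at h
      exact absurd (h.1.symm ▸ List.mem_cons_self) h₁
    | cons b t₂ =>
      simp only [List.cons_append, List.cons.injEq] at h
      have := ih t₂ r₁ r₂ (fun hm => h₁ (List.mem_cons_of_mem _ hm))
        (fun hm => h₂ (List.mem_cons_of_mem _ hm)) h.2
      exact ⟨by rw [h.1, this.1], this.2⟩

theorem pvEdge_inj {u v u' v' : String} (hu : pvSF u) (hu' : pvSF u')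
    (h : pvEdge u v = pvEdge u' v') : u = u' ∧ v = v' := by
  unfold pvEdge at h
  have h' : u.toList ++ ' ' :: v.toList = u'.toList ++ ' ' :: v'.toList := by
    have := congrArg String.toList h
    simpa [String.toList_ofList] using this
  have := pv_append_cons_inj u.toList u'.toList v.toList v'.toList hu hu' h'
  exact ⟨String.toList_inj.mp this.1, String.toList_inj.mp this.2⟩

theorem pvChr_toNat {i : Nat} (h : i < 26) : (pvChr i).toNat = 97 + i := by
  have hv : (97 + i).isValidChar := by constructor; omega
  simp [pvChr, Char.toNat_ofNat, hv]

theorem pvChr_ne_space {i : Nat} (h : i < 26) : pvChr i ≠ ' ' := by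
  intro hc
  have := congrArg Char.toNat hc
  rw [pvChr_toNat h] at this
  simp at this
  omega

-- every vertex label is space-free
theorem pvSF_ext {v : String} (hv : v ∈ pvExtAlphabet) : pvSF v := by
  simp only [pvExtAlphabet, pvAlphabet, List.mem_append, List.mem_map, List.mem_flatMap,
    List.mem_range] at hv
  rcases hv with ⟨i, hi, rfl⟩ | ⟨i, hi, j, hj, rfl⟩ <;>
    simp [pvSF, String.toList_ofList] <;>
    first
    | exact fun hc => pvChr_ne_space hi hc.symm
    | exact ⟨fun hc => pvChr_ne_space hi hc.symm, fun hc => pvChr_ne_space hj hc.symm⟩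

-- the 702 vertex labels are pairwise distinct
theorem pvExt_nodup : pvExtAlphabet.Nodup := by
  have hchr : ∀ i j, i < 26 → j < 26 → pvChr i = pvChr j → i = j := by
    intro i j hi hj h
    have := congrArg Char.toNat h
    rw [pvChr_toNat hi, pvChr_toNat hj] at this
    omega
  have h1 : pvAlphabet.Nodup := by
    refine List.Nodup.map_on ?_ List.nodup_range
    intro i hi j hj h
    simp only [List.mem_range] at hi hj
    have := congrArg String.toList h
    simp only [String.toList_ofList, List.cons.injEq] at this
    exact hchr i j hi hj this.1
  have hprod : (List.range 26).flatMap
      (fun i => (List.range 26).map (fun j => String.ofList [pvChr i, pvChr j]))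
      = ((List.range 26) ×ˢ (List.range 26)).map (fun p => String.ofList [pvChr p.1, pvChr p.2]) := by
    simp [SProd.sprod, List.product, List.map_flatMap, Function.comp_def]
  have h2 : ((List.range 26).flatMap
      (fun i => (List.range 26).map (fun j => String.ofList [pvChr i, pvChr j]))).Nodup := by
    rw [hprod]
    refine List.Nodup.map_on ?_ (List.Nodup.product List.nodup_range List.nodup_range)
    rintro ⟨p1, p2⟩ hp ⟨q1, q2⟩ hq h
    simp only [List.mem_product, List.mem_range] at hp hq
    have := congrArg String.toList h
    simp only [String.toList_ofList, List.cons.injEq] at this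
    have e1 := hchr p1 q1 hp.1 hq.1 this.1
    have e2 := hchr p2 q2 hp.2 hq.2 this.2.1
    simp [e1, e2]
  refine List.Nodup.append h1 h2 ?_
  intro v hv hv'
  simp only [pvAlphabet, List.mem_map, List.mem_range] at hv
  simp only [List.mem_flatMap, List.mem_map, List.mem_range] at hv'
  rcases hv with ⟨i, hi, rfl⟩
  rcases hv' with ⟨a, ha, b, hb, hab⟩
  have := congrArg (fun s => s.toList.length) hab
  simp [String.toList_ofList] at this

-- elements of s are edges whose FIRST endpoint is an already-processed vertex
def pvGood (s : List String) (P : List String) : Prop :=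
  ∀ e ∈ s, ∃ u v, u ∈ P ∧ pvSF u ∧ e = pvEdge u v

-- A's inner loop over the already-processed prefix: the reverse edge is present, everything skips
theorem pv_inner_skip (x : String) :
    ∀ (P : List String) (s : PySem.Set String), (∀ v ∈ P, pvEdge v x ∈ s) →
    P.foldl (fun s v2 =>
      if x == v2 || PySem.Set.contains s (pvEdge x v2) || PySem.Set.contains s (pvEdge v2 x)
      then s else PySem.Set.add s (pvEdge x v2)) s = s := by
  intro P
  induction P with
  | nil => intro s _; rfl
  | cons v t ih =>
    intro s hs
    have hm : PySem.Set.contains s (pvEdge v x) = true :=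
      (PySem.Set.contains_iff s _).mpr (hs v List.mem_cons_self)
    simp only [List.foldl_cons, hm, Bool.or_true, if_pos]
    exact ih s (fun w hw => hs w (List.mem_cons_of_mem _ hw))

-- A's inner loop over the not-yet-processed suffix: every edge is fresh and gets added
theorem pv_inner_fresh (x : String) (hx : pvSF x) :
    ∀ (L : List String) (s : PySem.Set String), L.Nodup →
    (∀ v ∈ L, pvSF v ∧ x ≠ v ∧ pvEdge x v ∉ s ∧ pvEdge v x ∉ s) →
    L.foldl (fun s v2 =>
      if x == v2 || PySem.Set.contains s (pvEdge x v2) || PySem.Set.contains s (pvEdge v2 x)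
      then s else PySem.Set.add s (pvEdge x v2)) s = s ++ L.map (pvEdge x) := by
  intro L
  induction L with
  | nil => intro s _ _; simp
  | cons v t ih =>
    intro s hnd hL
    obtain ⟨hsfv, hne, hf, hr⟩ := hL v List.mem_cons_self
    have hc1 : List.contains s (pvEdge x v) = false := by simpa using hf
    have hc2 : List.contains s (pvEdge v x) = false := by simpa using hr
    have hcond : (x == v || PySem.Set.contains s (pvEdge x v) || PySem.Set.contains s (pvEdge v x)) = false := by
      simp only [PySem.Set.contains_eq_listContains, hc1, hc2, Bool.or_false, beq_eq_false_iff_ne]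
      exact hne
    simp only [List.foldl_cons, hcond, Bool.false_eq_true, reduceIte]
    rw [PySem.Set.add_of_not_mem hf]
    rw [ih (s ++ [pvEdge x v]) hnd.of_cons ?_]
    · simp
    · intro w hw
      obtain ⟨hsfw, hnew, hfw, hrw⟩ := hL w (List.mem_cons_of_mem _ hw)
      have hwv : w ≠ v := fun h => (List.nodup_cons.mp hnd).1 (h ▸ hw)
      constructor
      · exact hsfw
      constructor
      · exact hnew
      constructor
      · intro hmem
        rcases List.mem_append.mp hmem with h' | h'
        · exact hfw h'
        · have : pvEdge x w = pvEdge x v := by simpa using h'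
          exact hwv (pvEdge_inj hx hx this).2
      · intro hmem
        rcases List.mem_append.mp hmem with h' | h'
        · exact hrw h'
        · have : pvEdge w x = pvEdge x v := by simpa using h'
          exact hnew ((pvEdge_inj hsfw hx this).1).symm

-- B's inner loop: the same fresh edges appended unconditionally
theorem pv_inner_fresh_alt (x : String) (hx : pvSF x) :
    ∀ (L : List String) (s : PySem.Set String), L.Nodup →
    (∀ v ∈ L, pvEdge x v ∉ s) →
    L.foldl (fun s v2 => PySem.Set.add s (pvEdge x v2)) s = s ++ L.map (pvEdge x) := by
  intro L
  induction L with
  | nil => intro s _ _; simp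
  | cons v t ih =>
    intro s hnd hL
    simp only [List.foldl_cons]
    rw [PySem.Set.add_of_not_mem (hL v List.mem_cons_self)]
    rw [ih (s ++ [pvEdge x v]) hnd.of_cons ?_]
    · simp
    · intro w hw hmem
      rcases List.mem_append.mp hmem with h' | h'
      · exact hL w (List.mem_cons_of_mem _ hw) h'
      · have : pvEdge x w = pvEdge x v := by simpa using h'
        exact (List.nodup_cons.mp hnd).1 ((pvEdge_inj hx hx this).2 ▸ hw)

-- main loop correspondence: A's remaining outer iterations equal B's loop, given the invariant
theorem pv_outer (P S : List String) (s : PySem.Set String)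
    (hnd : (P ++ S).Nodup) (hsf : ∀ v ∈ P ++ S, pvSF v)
    (hgood : pvGood s P)
    (hcomp : ∀ u ∈ P, ∀ w ∈ S, pvEdge u w ∈ s) :
    S.foldl (fun s v1 => (P ++ S).foldl (fun s v2 =>
      if v1 == v2 || PySem.Set.contains s (pvEdge v1 v2) || PySem.Set.contains s (pvEdge v2 v1)
      then s else PySem.Set.add s (pvEdge v1 v2)) s) s = pvAltLoop s S := by
  induction S generalizing P s with
  | nil => rfl
  | cons x t ih =>
    have hsfx : pvSF x := hsf x (List.mem_append_right _ List.mem_cons_self)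
    have hxP : x ∉ P := fun h =>
      (List.disjoint_of_nodup_append hnd) h List.mem_cons_self
    have hfresh : ∀ v ∈ t, pvSF v ∧ x ≠ v ∧ pvEdge x v ∉ s ∧ pvEdge v x ∉ s := by
      intro v hv
      have hsfv : pvSF v := hsf v (List.mem_append_right _ (List.mem_cons_of_mem _ hv))
      have hvP : v ∉ P := fun h =>
        (List.disjoint_of_nodup_append hnd) h (List.mem_cons_of_mem _ hv)
      have hxv : x ≠ v := by
        have := (List.nodup_append.mp hnd).2.1
        exact fun h => (List.nodup_cons.mp this).1 (h ▸ hv)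
      refine ⟨hsfv, hxv, ?_, ?_⟩
      · intro hmem
        obtain ⟨u, w, huP, hsfu, he⟩ := hgood _ hmem
        exact hxP ((pvEdge_inj hsfx hsfu he).1 ▸ huP)
      · intro hmem
        obtain ⟨u, w, huP, hsfu, he⟩ := hgood _ hmem
        exact hvP ((pvEdge_inj hsfv hsfu he).1 ▸ huP)
    -- A's one outer iteration for v1 = x
    have hstep : (P ++ x :: t).foldl (fun s v2 =>
        if x == v2 || PySem.Set.contains s (pvEdge x v2) || PySem.Set.contains s (pvEdge v2 x)
        then s else PySem.Set.add s (pvEdge x v2)) s = s ++ t.map (pvEdge x) := by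
      rw [List.foldl_append]
      rw [pv_inner_skip x P s (fun v hv => hcomp v hv x List.mem_cons_self)]
      simp only [List.foldl_cons, beq_self_eq_true, Bool.true_or, reduceIte]
      exact pv_inner_fresh x hsfx t s
        ((List.nodup_append.mp hnd).2.1).of_cons hfresh
    -- B's one iteration
    have hstep' : t.foldl (fun s v2 => PySem.Set.add s (pvEdge x v2)) s = s ++ t.map (pvEdge x) :=
      pv_inner_fresh_alt x hsfx t s ((List.nodup_append.mp hnd).2.1).of_cons
        (fun v hv => (hfresh v hv).2.2.1)
    simp only [List.foldl_cons, pvAltLoop, hstep, hstep']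
    have hre : P ++ x :: t = (P ++ [x]) ++ t := by simp
    rw [show (fun s v1 => (P ++ x :: t).foldl (fun s v2 =>
          if v1 == v2 || PySem.Set.contains s (pvEdge v1 v2) || PySem.Set.contains s (pvEdge v2 v1)
          then s else PySem.Set.add s (pvEdge v1 v2)) s)
        = (fun s v1 => ((P ++ [x]) ++ t).foldl (fun s v2 =>
          if v1 == v2 || PySem.Set.contains s (pvEdge v1 v2) || PySem.Set.contains s (pvEdge v2 v1)
          then s else PySem.Set.add s (pvEdge v1 v2)) s) from by rw [← hre]]
    refine ih (P ++ [x]) (s ++ t.map (pvEdge x)) (hre ▸ hnd) (fun v hv => hsf v (hre ▸ hv)) ?_ ?_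
    · intro e he
      rcases List.mem_append.mp he with h' | h'
      · obtain ⟨u, w, huP, hsfu, heq⟩ := hgood _ h'
        exact ⟨u, w, List.mem_append_left _ huP, hsfu, heq⟩
      · obtain ⟨v, hv, rfl⟩ := List.mem_map.mp h'
        exact ⟨x, v, List.mem_append_right _ List.mem_cons_self, hsfx, rfl⟩
    · intro u hu w hw
      rcases List.mem_append.mp hu with h' | h'
      · exact List.mem_append_left _ (hcomp u h' w (List.mem_cons_of_mem _ hw))
      · have : u = x := by simpa using h'
        subst this
        exact List.mem_append_right _ (List.mem_map_of_mem hw)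

-- ===== VERDICT (by name: the statement is the Claim_ definition above) =====
theorem generate_complete_graph_spec : Claim_equal_generate_complete_graph := by
  intro n _
  unfold Spec_generate_complete_graph generate_complete_graph generate_complete_graph_alt
  have hpre : (PySem.List.slice pvExtAlphabet none (some n)) <+: pvExtAlphabet := by
    simp only [PySem.List.slice]
    exact List.take_prefix _ _
  have hnd : (PySem.List.slice pvExtAlphabet none (some n)).Nodup :=
    pvExt_nodup.sublist hpre.sublist
  have hsf : ∀ v ∈ PySem.List.slice pvExtAlphabet none (some n), pvSF v :=
    fun v hv => pvSF_ext (hpre.sublist.mem hv)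
  have := pv_outer [] (PySem.List.slice pvExtAlphabet none (some n)) PySem.Set.empty
    (by simpa using hnd) (by simpa using hsf)
    (fun e he => absurd he (List.not_mem_nil))
    (fun u hu => absurd hu (List.not_mem_nil))
  simpa using this
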